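-- pv_equiv track=rewrite | github.com/RyanHPaez/python_projects | mutateTheArray.py | solution
-- ===== SOURCE A (Python) =====
-- def solution(n, a):
--     if len(a) < 2:
--         return a
--     result = []
--     for i in range(len(a)):
--         # if i = 0 then i - 1 does not exist so [i-1] becomes 0 and we can
--         # just leave it off
--         if i == 0:
--             result.append(a[i] + a[i + 1])
--         # if i is pointing to the last element then [i + 1] does not exist so
--         # it becomes 0 and we can just leave that off
--         elif i == len(a) - 1:
--             result.append((a[i - 1] + a[i]))
--         # for all other cases just do the normal equation
--         else:
--             result.append(a[i - 1] + a[i] + a[i + 1])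
--
--     return result
-- ===== SOURCE B (Python) =====
-- def solution(n, a):
--     if len(a) < 2:
--         return a
--     m = len(a)
--     prefix = [0]
--     for x in a:
--         prefix.append(prefix[-1] + x)
--     out = []
--     for i in range(m):
--         left = max(0, i - 1)
--         right = min(m - 1, i + 1)
--         out.append(prefix[right + 1] - prefix[left])
--     return out
-- ===== Notes on version B (the rewrite author's own statement) =====
-- stated objective: alternative
-- what changed: B precomputes a prefix-sum table and produces each windowed neighbor-sum as one subtraction of two clipped table lookups, replacing A's per-element boundary branching on i==0 / i==len-1.
import Mathlib
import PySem

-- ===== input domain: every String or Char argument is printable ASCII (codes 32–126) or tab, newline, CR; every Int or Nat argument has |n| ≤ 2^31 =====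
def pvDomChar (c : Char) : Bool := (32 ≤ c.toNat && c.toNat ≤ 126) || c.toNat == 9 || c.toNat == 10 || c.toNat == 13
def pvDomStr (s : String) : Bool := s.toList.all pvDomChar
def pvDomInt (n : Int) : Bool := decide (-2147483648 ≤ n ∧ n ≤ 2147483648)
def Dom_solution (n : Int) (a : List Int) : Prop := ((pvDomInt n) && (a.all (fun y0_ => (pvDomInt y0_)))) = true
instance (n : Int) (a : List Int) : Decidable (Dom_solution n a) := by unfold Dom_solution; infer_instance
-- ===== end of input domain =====

-- B replaces A's per-element boundary branching by a prefix-sum table: each windowed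
-- neighbor-sum is one subtraction of two clipped table lookups (alternative decomposition, same cost).

-- ===== PORT A =====
-- every index A uses is provably in range, so pyGetD _ _ 0 is exact for a[i] here
def solution (n : Int) (a : List Int) : List Int :=
  if a.length < 2 then a
  else
    (PySem.List.pyRange 0 (a.length : Int) 1).foldl (fun result i =>
      if i = 0 then
        result ++ [PySem.List.pyGetD a i 0 + PySem.List.pyGetD a (i + 1) 0]
      else if i = (a.length : Int) - 1 then
        result ++ [PySem.List.pyGetD a (i - 1) 0 + PySem.List.pyGetD a i 0]
      else
        result ++ [PySem.List.pyGetD a (i - 1) 0 + PySem.List.pyGetD a i 0 + PySem.List.pyGetD a (i + 1) 0]) []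

-- ===== PORT B =====
-- every index B uses (including prefix[-1] on the nonempty table) is in range, so pyGetD _ _ 0 is exact
def solution_alt (n : Int) (a : List Int) : List Int :=
  if a.length < 2 then a
  else
    let m : Int := a.length
    let pre := a.foldl (fun p x => p ++ [PySem.List.pyGetD p (-1) 0 + x]) [0]
    (PySem.List.pyRange 0 m 1).foldl (fun out i =>
      let left := max 0 (i - 1)
      let right := min (m - 1) (i + 1)
      out ++ [PySem.List.pyGetD pre (right + 1) 0 - PySem.List.pyGetD pre left 0]) []

-- ===== PRECONDITION & SPEC =====
def Spec_solution (n : Int) (a : List Int) (out : List Int) : Prop := out = solution_alt n a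
instance (n : Int) (a : List Int) (out : List Int) : Decidable (Spec_solution n a out) := by unfold Spec_solution; infer_instance

-- ===== CLAIM (what is proved, stated in full; the proofs are below) =====
def Claim_equal_solution : Prop := ∀ (n : Int) (a : List Int), Dom_solution n a → Spec_solution n a (solution n a)

-- ===== LEMMAS AND PROOFS =====

theorem prefix_eq (a : List Int) :
    a.foldl (fun p x => p ++ [PySem.List.pyGetD p (-1) 0 + x]) [0]
      = (List.range (a.length + 1)).map (fun k => ((a.take k).sum : Int)) := by
  induction a using List.reverseRecOn with
  | nil => simp
  | append_singleton a x ih =>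
      rw [List.foldl_append, ih, List.foldl_cons, List.foldl_nil]
      rw [List.range_succ, List.map_append]
      simp only [List.map_singleton]
      rw [PySem.List.pyGetD_neg_one_append_singleton]
      have hlen : (a ++ [x]).length + 1 = (a.length + 1) + 1 := by simp
      rw [hlen, List.range_succ (n := a.length + 1), List.map_append]
      have hmap : (List.range (a.length + 1)).map (fun k => (((a ++ [x]).take k).sum : Int))
          = (List.range (a.length + 1)).map (fun k => ((a.take k).sum : Int)) := by
        apply List.map_congr_left
        intro k hk
        rw [List.mem_range] at hk
        rw [List.take_append_of_le_length (by omega)]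
      rw [hmap, List.range_succ, List.map_append]
      simp

theorem prefix_get (a : List Int) (k : Int) (h0 : 0 ≤ k) (h1 : k ≤ (a.length : Int)) :
    PySem.List.pyGetD (a.foldl (fun p x => p ++ [PySem.List.pyGetD p (-1) 0 + x]) [0]) k 0
      = (a.take k.toNat).sum := by
  rw [prefix_eq, PySem.List.pyGetD_eq_getElem _ _ h0 (by simp; omega)]
  simp

theorem sum_take_succ_getD (a : List Int) (q : Nat) (h : q < a.length) :
    (a.take (q+1)).sum = (a.take q).sum + a.getD q 0 := by
  rw [List.sum_take_succ _ _ h, List.getD_eq_getElem]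

theorem prefix_get' (a : List Int) (k : Nat) (h1 : k ≤ a.length) :
    PySem.List.pyGetD (a.foldl (fun p x => p ++ [PySem.List.pyGetD p (-1) 0 + x]) [0]) (k : Int) 0
      = (a.take k).sum := by
  rw [prefix_get a k (by omega) (by omega)]
  simp

theorem solution_spec' (n : Int) (a : List Int) : solution n a = solution_alt n a := by
  unfold solution solution_alt
  by_cases hs : a.length < 2
  · simp [hs]
  · simp only [hs, if_neg]
    have hfa : (fun (result : List Int) (i : Int) =>
        if i = 0 then
          result ++ [PySem.List.pyGetD a i 0 + PySem.List.pyGetD a (i + 1) 0]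
        else if i = (a.length : Int) - 1 then
          result ++ [PySem.List.pyGetD a (i - 1) 0 + PySem.List.pyGetD a i 0]
        else
          result ++ [PySem.List.pyGetD a (i - 1) 0 + PySem.List.pyGetD a i 0 + PySem.List.pyGetD a (i + 1) 0])
        = (fun result i => result ++ [
            if i = 0 then PySem.List.pyGetD a i 0 + PySem.List.pyGetD a (i + 1) 0
            else if i = (a.length : Int) - 1 then PySem.List.pyGetD a (i - 1) 0 + PySem.List.pyGetD a i 0
            else PySem.List.pyGetD a (i - 1) 0 + PySem.List.pyGetD a i 0 + PySem.List.pyGetD a (i + 1) 0]) := by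
      funext r i; split_ifs <;> rfl
    rw [hfa, PySem.List.foldl_append_singleton_eq_map, PySem.List.foldl_append_singleton_eq_map]
    simp only [List.nil_append]
    apply List.map_congr_left
    intro i hi
    rw [PySem.List.mem_pyRange_one] at hi
    obtain ⟨hi0, him⟩ := hi
    have h2 : 2 ≤ a.length := by omega
    obtain ⟨j, rfl⟩ : ∃ j : Nat, i = (j : Int) := ⟨i.toNat, by omega⟩
    by_cases hz : (j : Int) = 0
    · obtain rfl : j = 0 := by omega
      rw [if_pos hz]
      rw [show min ((a.length : Int) - 1) (((0:Nat):Int) + 1) + 1 = ((2:Nat):Int) by omega,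
          show max 0 ((((0:Nat):Int)) - 1) = ((0:Nat):Int) by omega,
          show (((0:Nat):Int)) + 1 = ((1:Nat):Int) by omega]
      rw [prefix_get' a 2 (by omega), prefix_get' a 0 (by omega),
          PySem.List.pyGetD_natCast, PySem.List.pyGetD_natCast,
          sum_take_succ_getD a 1 (by omega), sum_take_succ_getD a 0 (by omega)]
      simp
    · rw [if_neg hz]
      obtain ⟨q, rfl⟩ : ∃ q : Nat, j = q + 1 := ⟨j - 1, by omega⟩
      by_cases hl : ((q + 1 : Nat) : Int) = (a.length : Int) - 1
      · rw [if_pos hl]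
        rw [show min ((a.length : Int) - 1) (((q + 1 : Nat) : Int) + 1) + 1 = ((q + 2 : Nat) : Int) by omega,
            show max 0 ((((q + 1 : Nat) : Int)) - 1) = ((q : Nat) : Int) by omega,
            show (((q + 1 : Nat) : Int)) - 1 = ((q : Nat) : Int) by omega]
        rw [prefix_get' a (q + 2) (by omega), prefix_get' a q (by omega),
            PySem.List.pyGetD_natCast, PySem.List.pyGetD_natCast,
            show q + 2 = (q + 1) + 1 from rfl,
            sum_take_succ_getD a (q + 1) (by omega), sum_take_succ_getD a q (by omega)]
        ring
      · rw [if_neg hl]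
        rw [show min ((a.length : Int) - 1) (((q + 1 : Nat) : Int) + 1) + 1 = ((q + 3 : Nat) : Int) by omega,
            show max 0 ((((q + 1 : Nat) : Int)) - 1) = ((q : Nat) : Int) by omega,
            show (((q + 1 : Nat) : Int)) - 1 = ((q : Nat) : Int) by omega,
            show (((q + 1 : Nat) : Int)) + 1 = ((q + 2 : Nat) : Int) by omega]
        rw [prefix_get' a (q + 3) (by omega), prefix_get' a q (by omega),
            PySem.List.pyGetD_natCast, PySem.List.pyGetD_natCast, PySem.List.pyGetD_natCast,
            show q + 3 = ((q + 1) + 1) + 1 from rfl,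
            sum_take_succ_getD a ((q + 1) + 1) (by omega),
            sum_take_succ_getD a (q + 1) (by omega), sum_take_succ_getD a q (by omega)]
        ring

-- ===== VERDICT (by name: the statement is the Claim_ definition above) =====
theorem solution_spec : Claim_equal_solution := by
  intro n a _
  exact solution_spec' n a
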